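-- pv_equiv track=rewrite | github.com/j4ptl/Doppio-Box | backend/app/bench.py | _mask_command
-- ===== SOURCE A (Python) =====
-- def _mask_command(command: list[str]) -> list[str]:
--   sensitive_flags = {
--     "--admin-password",
--     "--mariadb-root-password",
--   }
--   masked: list[str] = []
--   hide_next = False
--
--   for part in command:
--     if hide_next:
--       masked.append("********")
--       hide_next = False
--       continue
--
--     masked.append(part)
--
--     if part in sensitive_flags:
--       hide_next = True
--
--   return masked
-- ===== SOURCE B (Python) =====
-- def _mask_command(command: list[str]) -> list[str]:
--   sensitive_flags = {
--     "--admin-password",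
--     "--mariadb-root-password",
--   }
--   masked: list[str] = []
--   i = 0
--   n = len(command)
--   while i < n:
--     part = command[i]
--     if part in sensitive_flags and i + 1 < n:
--       masked.append(part)
--       masked.append("********")
--       i += 2
--     else:
--       masked.append(part)
--       i += 1
--   return masked
-- ===== Notes on version B (the rewrite author's own statement) =====
-- stated objective: alternative
-- what changed: Replaces the stateful hide_next boolean carried across iterations with an index-driven loop that consumes a sensitive flag and its following value as one pair, jumping by two.
import Mathlib
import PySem

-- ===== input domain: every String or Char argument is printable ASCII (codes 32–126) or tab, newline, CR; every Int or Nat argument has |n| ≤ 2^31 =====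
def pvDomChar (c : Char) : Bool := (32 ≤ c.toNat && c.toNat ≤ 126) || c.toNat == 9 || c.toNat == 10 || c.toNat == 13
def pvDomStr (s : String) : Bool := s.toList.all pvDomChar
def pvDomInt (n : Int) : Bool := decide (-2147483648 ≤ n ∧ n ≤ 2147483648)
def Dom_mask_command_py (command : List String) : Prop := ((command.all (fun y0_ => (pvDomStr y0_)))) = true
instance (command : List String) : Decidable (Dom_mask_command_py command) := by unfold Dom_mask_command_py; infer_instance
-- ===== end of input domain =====

-- B replaces A's hide_next state flag with a pair-consuming recursion; return value only, no mutation.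

-- ===== PORT A =====
-- the set of sensitive flags (a Python set literal of two strings)
def pvSensitiveFlags : PySem.Set String :=
  PySem.Set.ofList ["--admin-password", "--mariadb-root-password"]

-- one iteration of A's for-loop over state (masked, hide_next)
def pvMaskStep (st : List String × Bool) (part : String) : List String × Bool :=
  if st.2 then (st.1 ++ ["********"], false)
  else (st.1 ++ [part], decide (part ∈ pvSensitiveFlags))

def mask_command_py (command : List String) : List String :=
  (command.foldl pvMaskStep ([], false)).1

-- ===== PORT B =====
-- B's while loop: at each position, a sensitive flag with a following element is
-- consumed together with that element (masked); otherwise one element is copied.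
def pvMaskPairs : List String → List String
  | [] => []
  | [part] => [part]
  | part :: v :: rest =>
    if part ∈ pvSensitiveFlags then
      part :: "********" :: pvMaskPairs rest
    else
      part :: pvMaskPairs (v :: rest)

def mask_command_py_alt (command : List String) : List String :=
  pvMaskPairs command

-- ===== PRECONDITION & SPEC =====
def Spec_mask_command_py (command : List String) (out : List String) : Prop := out = mask_command_py_alt command
instance (command : List String) (out : List String) : Decidable (Spec_mask_command_py command out) := by unfold Spec_mask_command_py; infer_instance

-- ===== CLAIM (what is proved, stated in full; the proofs are below) =====
def Claim_equal_mask_command_py : Prop := ∀ (command : List String), Dom_mask_command_py command → Spec_mask_command_py command (mask_command_py command)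

-- ===== LEMMAS AND PROOFS =====
theorem pvMaskLoop_eq (command : List String) :
    ∀ acc : List String,
      (command.foldl pvMaskStep (acc, false)).1 = acc ++ pvMaskPairs command := by
  induction command using pvMaskPairs.induct with
  | case1 => simp [pvMaskPairs]
  | case2 part =>
    intro acc
    by_cases hm : part ∈ pvSensitiveFlags <;>
      simp [pvMaskPairs, List.foldl, pvMaskStep, hm]
  | case3 part v rest hmem ih =>
    intro acc
    simp [pvMaskPairs, hmem, List.foldl, pvMaskStep, ih]
  | case4 part v rest hmem ih =>
    intro acc
    have h := ih (acc ++ [part])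
    simp [pvMaskPairs, hmem, List.foldl, pvMaskStep] at h ⊢
    simpa using h

-- ===== VERDICT (by name: the statement is the Claim_ definition above) =====
theorem mask_command_py_spec : Claim_equal_mask_command_py := by
  intro command _
  unfold Spec_mask_command_py mask_command_py mask_command_py_alt
  simpa using pvMaskLoop_eq command []
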